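-- pv_equiv track=rewrite | github.com/isndotbiz/ged | gedfix/names.py | capitalize_name_word
-- ===== SOURCE A (Python) =====
-- def capitalize_name_word(word: str) -> str:
--     """Capitalize a single name word with special handling for prefixes."""
--     if not word:
--         return word
--
--     # Handle names with apostrophes (O'Connor, D'Angelo)
--     if "'" in word:
--         parts = word.split("'")
--         return "'".join([capitalize_name_word(part) for part in parts])
--
--     # Handle hyphenated names
--     if '-' in word:
--         parts = word.split('-')
--         return '-'.join([capitalize_name_word(part) for part in parts])
--
--     # Handle Scottish/Irish prefixes
--     if word.lower().startswith('mc'):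
--         if len(word) > 2:
--             return 'Mc' + word[2:].capitalize()
--         return word.capitalize()
--
--     if word.lower().startswith('mac'):
--         if len(word) > 3:
--             return 'Mac' + word[3:].capitalize()
--         return word.capitalize()
--
--     # Standard capitalization
--     return word.capitalize()
-- ===== SOURCE B (Python) =====
-- def _cap_token(tok):
--     low = tok.lower()
--     if low.startswith('mc') and len(tok) > 2:
--         return 'Mc' + tok[2:].capitalize()
--     if low.startswith('mac') and len(tok) > 3:
--         return 'Mac' + tok[3:].capitalize()
--     return tok.capitalize()
--
--
-- def capitalize_name_word(word: str) -> str: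
--     """Capitalize a name word: one left-to-right pass that splits on ' and -
--     in a single tokenization instead of A's recursive split/join."""
--     if not word:
--         return word
--     out = []
--     token = []
--     for ch in word:
--         if ch == "'" or ch == '-':
--             out.append(_cap_token(''.join(token)))
--             out.append(ch)
--             token = []
--         else:
--             token.append(ch)
--     out.append(_cap_token(''.join(token)))
--     return ''.join(out)
-- ===== Notes on version B (the rewrite author's own statement) =====
-- stated objective: alternative
-- what changed: Replaces A's recursive split-on-apostrophe-then-split-on-hyphen with rejoining by a single left-to-right pass that tokenizes on both delimiters at once and capitalizes each delimiter-free token with one non-recursive helper.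
import Mathlib
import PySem

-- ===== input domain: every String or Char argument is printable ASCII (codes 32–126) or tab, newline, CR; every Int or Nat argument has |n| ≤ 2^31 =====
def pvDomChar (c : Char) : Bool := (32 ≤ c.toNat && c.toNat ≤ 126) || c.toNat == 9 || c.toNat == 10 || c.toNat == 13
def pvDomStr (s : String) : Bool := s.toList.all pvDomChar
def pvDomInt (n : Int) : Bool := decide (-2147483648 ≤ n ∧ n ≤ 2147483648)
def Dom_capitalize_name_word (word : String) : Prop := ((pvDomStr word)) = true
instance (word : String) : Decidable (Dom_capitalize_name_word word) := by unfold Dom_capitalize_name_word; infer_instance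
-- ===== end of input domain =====

-- B rewrites A's recursive split/rejoin as a single left-to-right tokenizing pass (objective: alternative decomposition, same cost).

-- ===== PORT A =====
-- word.capitalize(): first char upper, rest lower (exact on the ASCII domain, where
-- Python's title-casing of the first character coincides with upper-casing).
def capChars (cs : List Char) : List Char :=
  match cs with
  | [] => []
  | d :: t => PySem.Chars.upperChar d :: PySem.Chars.lower t

-- reference form of cs.split("<c>") used only to prove termination / in the proofs below
def splitC (c : Char) : List Char → List (List Char)
  | [] => [[]]
  | d :: t =>
    if d = c then [] :: splitC c t
    else
      match splitC c t with
      | [] => [[d]]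
      | p :: ps => (d :: p) :: ps

theorem splitC_ne_nil (c : Char) (cs : List Char) : splitC c cs ≠ [] := by
  induction cs with
  | nil => simp [splitC]
  | cons d t ih =>
    simp only [splitC]
    split
    · simp
    · split
      · simp
      · simp

theorem go_eq (c : Char) (l : List Char) : ∀ (fuel : Nat), l.length < fuel → ∀ cur acc,
    PySem.Chars.splitOn.go [c] fuel l cur acc
      = acc.reverse ++ ((splitC c l).modifyHead (fun p => cur.reverse ++ p)) := by
  induction l with
  | nil =>
    intro fuel hf cur acc
    match fuel, hf with
    | fuel + 1, _ => simp [PySem.Chars.splitOn.go, splitC]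
  | cons d t ih =>
    intro fuel hf cur acc
    match fuel, hf with
    | fuel + 1, hf =>
      simp only [PySem.Chars.splitOn.go]
      by_cases hd : d = c
      · subst hd
        have hpre : [d].isPrefixOf (d :: t) = true := by simp [List.isPrefixOf]
        rw [if_pos hpre]
        simp only [List.length_cons, List.length_nil, List.drop_succ_cons, List.drop_zero]
        rw [ih fuel (by simpa using hf) [] (cur.reverse :: acc)]
        simp only [splitC, List.reverse_cons, List.reverse_nil, List.nil_append]
        rcases splitC d t with _ | ⟨p, ps⟩ <;> simp
      · have hpre : [c].isPrefixOf (d :: t) = false := by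
          simp [List.isPrefixOf]
          intro h; exact absurd h.symm hd
        rw [if_neg (by simp [hpre])]
        rw [ih fuel (by simpa using hf) (d :: cur) acc]
        rcases hsp : splitC c t with _ | ⟨p, ps⟩
        · exact absurd hsp (splitC_ne_nil c t)
        · simp [splitC, hd, hsp]

theorem splitOn_singleton (c : Char) (cs : List Char) :
    PySem.Chars.splitOn cs [c] = splitC c cs := by
  unfold PySem.Chars.splitOn
  rw [go_eq c cs (cs.length + 1) (by omega) [] []]
  rcases hsp : splitC c cs with _ | ⟨p, ps⟩
  · exact absurd hsp (splitC_ne_nil c cs)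
  · simp

theorem mem_splitC_length_le (c : Char) (cs : List Char) :
    ∀ p ∈ splitC c cs, p.length ≤ cs.length := by
  induction cs with
  | nil => intro p hp; simp [splitC] at hp; simp [hp]
  | cons d t ih =>
    intro p hp
    simp only [splitC] at hp
    split at hp
    · rcases List.mem_cons.mp hp with h | h
      · simp [h]
      · have := ih p h; simp; omega
    · rcases hsp : splitC c t with _ | ⟨q, qs⟩
      · exact absurd hsp (splitC_ne_nil c t)
      · rw [hsp] at hp
        rcases List.mem_cons.mp hp with h | h
        · subst h
          have := ih q (by rw [hsp]; exact List.mem_cons_self)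
          simp; omega
        · have := ih p (by rw [hsp]; exact List.mem_cons_of_mem _ h)
          simp; omega

theorem mem_splitC_length_lt (c : Char) (cs : List Char) (hc : c ∈ cs) :
    ∀ p ∈ splitC c cs, p.length < cs.length := by
  induction cs with
  | nil => simp at hc
  | cons d t ih =>
    intro p hp
    simp only [splitC] at hp
    split at hp
    · rcases List.mem_cons.mp hp with h | h
      · subst h; simp
      · have := mem_splitC_length_le c t p h; simp; omega
    · rename_i hd
      have hct : c ∈ t := by
        rcases List.mem_cons.mp hc with h | h
        · exact absurd h.symm hd
        · exact h
      rcases hsp : splitC c t with _ | ⟨q, qs⟩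
      · exact absurd hsp (splitC_ne_nil c t)
      · rw [hsp] at hp
        rcases List.mem_cons.mp hp with h | h
        · subst h
          have := ih hct q (by rw [hsp]; exact List.mem_cons_self)
          simp; omega
        · have := ih hct p (by rw [hsp]; exact List.mem_cons_of_mem _ h)
          simp; omega

theorem isIn_singleton (c : Char) (cs : List Char) :
    PySem.Chars.isIn [c] cs = true ↔ c ∈ cs := by
  rw [PySem.Chars.isIn_iff_infix]
  exact List.singleton_infix_iff c cs

-- literal transliteration of A (on the character list; recursion through split parts via attach)
def capA (cs : List Char) : List Char :=
  if cs = [] then cs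
  else if h1 : PySem.Chars.isIn ['\''] cs = true then
    PySem.Chars.join ['\''] ((PySem.Chars.splitOn cs ['\'']).attach.map (fun p => capA p.1))
  else if h2 : PySem.Chars.isIn ['-'] cs = true then
    PySem.Chars.join ['-'] ((PySem.Chars.splitOn cs ['-']).attach.map (fun p => capA p.1))
  else if PySem.Chars.startswith (PySem.Chars.lower cs) ['m', 'c'] then
    if 2 < cs.length then 'M' :: 'c' :: capChars (PySem.List.slice cs (some 2) none)
    else capChars cs
  else if PySem.Chars.startswith (PySem.Chars.lower cs) ['m', 'a', 'c'] then
    if 3 < cs.length then 'M' :: 'a' :: 'c' :: capChars (PySem.List.slice cs (some 3) none)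
    else capChars cs
  else capChars cs
termination_by cs.length
decreasing_by
  · have := mem_splitC_length_lt '\'' cs ((isIn_singleton _ _).mp h1) p.1
      (by rw [← splitOn_singleton]; exact p.2)
    exact this
  · have := mem_splitC_length_lt '-' cs ((isIn_singleton _ _).mp h2) p.1
      (by rw [← splitOn_singleton]; exact p.2)
    exact this

def capitalize_name_word (word : String) : String :=
  String.ofList (capA word.toList)

-- ===== PORT B =====
-- _cap_token from Source B
def capTok (tok : List Char) : List Char :=
  let low := PySem.Chars.lower tok
  if PySem.Chars.startswith low ['m', 'c'] && decide (2 < tok.length) then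
    'M' :: 'c' :: capChars (PySem.List.slice tok (some 2) none)
  else if PySem.Chars.startswith low ['m', 'a', 'c'] && decide (3 < tok.length) then
    'M' :: 'a' :: 'c' :: capChars (PySem.List.slice tok (some 3) none)
  else capChars tok

-- the single pass of Source B: state = (out, current token); ''.join(out) = flatten
def capitalize_name_word_alt (word : String) : String :=
  let cs := word.toList
  if cs.isEmpty then word
  else
    let st := cs.foldl
      (fun (st : List (List Char) × List Char) ch =>
        if ch = '\'' ∨ ch = '-' then (st.1 ++ [capTok st.2, [ch]], ([] : List Char))
        else (st.1, st.2 ++ [ch]))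
      ([], [])
    String.ofList ((st.1 ++ [capTok st.2]).flatten)

-- ===== PRECONDITION & SPEC =====
def Spec_capitalize_name_word (word : String) (out : String) : Prop := out = capitalize_name_word_alt word
instance (word : String) (out : String) : Decidable (Spec_capitalize_name_word word out) := by unfold Spec_capitalize_name_word; infer_instance

-- ===== CLAIM (what is proved, stated in full; the proofs are below) =====
def Claim_equal_capitalize_name_word : Prop := ∀ (word : String), Dom_capitalize_name_word word → Spec_capitalize_name_word word (capitalize_name_word word)

-- ===== LEMMAS AND PROOFS =====

-- B's processing of the rest of the input, given the token accumulated so far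
def body (tok : List Char) : List Char → List Char
  | [] => capTok tok
  | ch :: t =>
    if ch = '\'' ∨ ch = '-' then capTok tok ++ ch :: body [] t
    else body (tok ++ [ch]) t

theorem capTok_nil : capTok [] = [] := by decide

theorem fold_eq_body (cs : List Char) : ∀ (out : List (List Char)) (tok : List Char),
    (((cs.foldl
      (fun (st : List (List Char) × List Char) ch =>
        if ch = '\'' ∨ ch = '-' then (st.1 ++ [capTok st.2, [ch]], ([] : List Char))
        else (st.1, st.2 ++ [ch]))
      (out, tok)).1 ++ [capTok (cs.foldl
      (fun (st : List (List Char) × List Char) ch =>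
        if ch = '\'' ∨ ch = '-' then (st.1 ++ [capTok st.2, [ch]], ([] : List Char))
        else (st.1, st.2 ++ [ch]))
      (out, tok)).2]).flatten) = out.flatten ++ body tok cs := by
  induction cs with
  | nil => intro out tok; simp [body]
  | cons ch t ih =>
    intro out tok
    by_cases h : ch = '\'' ∨ ch = '-'
    · simp only [List.foldl_cons, if_pos h, body]
      rw [ih]
      simp
    · simp only [List.foldl_cons, if_neg h, body]
      rw [ih]

theorem body_append_delim (c : Char) (hc : c = '\'' ∨ c = '-') (xs : List Char) :
    ∀ (tok ys : List Char), body tok (xs ++ c :: ys) = body tok xs ++ c :: body [] ys := by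
  induction xs with
  | nil => intro tok ys; simp [body, hc]
  | cons a xs' ih =>
    intro tok ys
    by_cases h : a = '\'' ∨ a = '-'
    · simp only [List.cons_append, body, if_pos h]
      rw [ih]
      simp
    · simp only [List.cons_append, body, if_neg h]
      rw [ih]

theorem body_no_delim (cs : List Char) : ∀ (tok : List Char),
    (∀ a ∈ cs, ¬(a = '\'' ∨ a = '-')) → body tok cs = capTok (tok ++ cs) := by
  induction cs with
  | nil => intro tok _; simp [body]
  | cons a t ih =>
    intro tok h
    have ha := h a List.mem_cons_self
    simp only [body, if_neg ha]
    rw [ih (tok ++ [a]) (fun b hb => h b (List.mem_cons_of_mem _ hb))]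
    simp

theorem join_splitC (c : Char) (cs : List Char) :
    PySem.Chars.join [c] (splitC c cs) = cs := by
  induction cs with
  | nil => simp [splitC, PySem.Chars.join_singleton]
  | cons d t ih =>
    simp only [splitC]
    by_cases hd : d = c
    · subst hd
      rw [if_pos rfl]
      rcases hsp : splitC d t with _ | ⟨p, ps⟩
      · exact absurd hsp (splitC_ne_nil d t)
      · rw [hsp] at ih
        rw [PySem.Chars.join_cons_cons]
        simp [ih]
    · rw [if_neg hd]
      rcases hsp : splitC c t with _ | ⟨p, ps⟩
      · exact absurd hsp (splitC_ne_nil c t)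
      · rw [hsp] at ih
        rcases ps with _ | ⟨q, qs⟩
        · rw [PySem.Chars.join_singleton] at ih ⊢
          simp [ih]
        · rw [PySem.Chars.join_cons_cons] at ih ⊢
          simp at ih ⊢
          simp [ih]

theorem body_join (c : Char) (hc : c = '\'' ∨ c = '-') :
    ∀ (parts : List (List Char)), parts ≠ [] →
    body [] (PySem.Chars.join [c] parts) = PySem.Chars.join [c] (parts.map (body [])) := by
  intro parts
  induction parts with
  | nil => intro h; exact absurd rfl h
  | cons p ps ih =>
    intro _
    rcases ps with _ | ⟨q, qs⟩
    · simp [PySem.Chars.join_singleton]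
    · rw [PySem.Chars.join_cons_cons]
      have : p ++ [c] ++ PySem.Chars.join [c] (q :: qs)
          = p ++ c :: PySem.Chars.join [c] (q :: qs) := by simp
      rw [this, body_append_delim c hc p [] _]
      rw [ih (by simp)]
      conv_rhs => rw [List.map_cons, List.map_cons, PySem.Chars.join_cons_cons]
      simp

-- on a token free of delimiters, A's branch chain computes exactly _cap_token
theorem capA_no_delim (cs : List Char)
    (h1 : ¬ PySem.Chars.isIn ['\''] cs = true) (h2 : ¬ PySem.Chars.isIn ['-'] cs = true) :
    capA cs = capTok cs := by
  rw [capA]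
  by_cases hnil : cs = []
  · subst hnil; simp [capTok_nil]
  · rw [if_neg hnil, dif_neg h1, dif_neg h2]
    by_cases hmc : PySem.Chars.startswith (PySem.Chars.lower cs) ['m', 'c'] = true
    · by_cases hlen : 2 < cs.length
      · rw [if_pos hmc, if_pos hlen]
        simp [capTok, hmc, hlen]
      · rw [if_pos hmc, if_neg hlen]
        have hmac : PySem.Chars.startswith (PySem.Chars.lower cs) ['m', 'a', 'c'] = false := by
          by_contra h
          rw [Bool.not_eq_false] at h
          obtain ⟨t1, ht1⟩ := (PySem.Chars.startswith_iff _ _).mp hmc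
          obtain ⟨t2, ht2⟩ := (PySem.Chars.startswith_iff _ _).mp h
          rw [← ht1] at ht2
          simp at ht2
        simp [capTok, hmc, hlen, hmac]
    · rw [if_neg hmc]
      by_cases hmac : PySem.Chars.startswith (PySem.Chars.lower cs) ['m', 'a', 'c'] = true
      · by_cases hlen : 3 < cs.length
        · rw [if_pos hmac, if_pos hlen]
          simp [capTok, hmc, hmac, hlen]
        · rw [if_pos hmac, if_neg hlen]
          simp [capTok, hmc, hmac, hlen]
      · rw [if_neg hmac]
        simp [capTok, hmc, hmac]

theorem no_delim_of_isIn_false (cs : List Char)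
    (h1 : ¬ PySem.Chars.isIn ['\''] cs = true) (h2 : ¬ PySem.Chars.isIn ['-'] cs = true) :
    ∀ a ∈ cs, ¬(a = '\'' ∨ a = '-') := by
  intro a ha h
  rcases h with h | h
  · exact h1 ((isIn_singleton _ _).mpr (h ▸ ha))
  · exact h2 ((isIn_singleton _ _).mpr (h ▸ ha))

theorem capA_eq_body (cs : List Char) : capA cs = body [] cs := by
  induction hn : cs.length using Nat.strong_induction_on generalizing cs with
  | _ n ih =>
  subst hn
  by_cases hnil : cs = []
  · subst hnil; simp [capA, body, capTok_nil]
  · by_cases h1 : PySem.Chars.isIn ['\''] cs = true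
    · have hc : ('\'' : Char) = '\'' ∨ ('\'' : Char) = '-' := Or.inl rfl
      rw [capA, if_neg hnil, dif_pos h1]
      rw [List.attach_map_val, splitOn_singleton]
      conv_rhs => rw [← join_splitC '\'' cs]
      rw [body_join '\'' hc _ (splitC_ne_nil '\'' cs)]
      congr 1
      apply List.map_congr_left
      intro p hp
      exact ih p.length
        (mem_splitC_length_lt '\'' cs ((isIn_singleton _ _).mp h1) p hp) p rfl
    · by_cases h2 : PySem.Chars.isIn ['-'] cs = true
      · have hc : ('-' : Char) = '\'' ∨ ('-' : Char) = '-' := Or.inr rfl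
        rw [capA, if_neg hnil, dif_neg h1, dif_pos h2]
        rw [List.attach_map_val, splitOn_singleton]
        conv_rhs => rw [← join_splitC '-' cs]
        rw [body_join '-' hc _ (splitC_ne_nil '-' cs)]
        congr 1
        apply List.map_congr_left
        intro p hp
        exact ih p.length
          (mem_splitC_length_lt '-' cs ((isIn_singleton _ _).mp h2) p hp) p rfl
      · rw [capA_no_delim cs h1 h2,
          body_no_delim cs [] (no_delim_of_isIn_false cs h1 h2)]
        simp

-- ===== VERDICT (by name: the statement is the Claim_ definition above) =====
theorem capitalize_name_word_spec : Claim_equal_capitalize_name_word := by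
  intro word _
  unfold Spec_capitalize_name_word capitalize_name_word capitalize_name_word_alt
  by_cases h : word.toList.isEmpty
  · rw [if_pos h]
    rw [List.isEmpty_iff] at h
    rw [h]
    have hw : String.ofList word.toList = word := String.ofList_toList
    rw [← hw, h]
    simp [capA]
  · rw [if_neg h]
    rw [capA_eq_body]
    have hf := fold_eq_body word.toList [] []
    simp only [List.flatten_nil, List.nil_append] at hf
    exact congrArg String.ofList hf.symm
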